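-- pv_equiv track=rewrite | github.com/li-xin-yi/aoc-2024-kotlin | python/day07.py | check_feasible
-- ===== SOURCE A (Python) =====
-- def check_feasible(result, operands):
--     cur = set([operands[0]])
--     for num in operands[1:]:
--         temp = set()
--         for prev in cur:
--             if prev + num <= result:
--                 temp.add(prev + num)
--             if prev * num <= result:
--                 temp.add(prev * num)
--         if not temp:
--             return False
--         cur = temp
--     return result in cur
-- ===== SOURCE B (Python) =====
-- def check_feasible(result, operands):
--     def dfs(cur, rest):
--         if not rest:
--             return cur == result
--         num = rest[0]
--         a = cur + num
--         m = cur * num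
--         return (a <= result and dfs(a, rest[1:])) or \
--                (m <= result and dfs(m, rest[1:]))
--     return dfs(operands[0], operands[1:])
-- ===== Notes on version B (the rewrite author's own statement) =====
-- stated objective: alternative
-- what changed: Replaces A's breadth-first set-of-reachable-values propagation (building a deduplicated set per operand) with a short-circuiting depth-first backtracking recursion that carries a single current value and tries + then * at each operand.
import Mathlib
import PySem

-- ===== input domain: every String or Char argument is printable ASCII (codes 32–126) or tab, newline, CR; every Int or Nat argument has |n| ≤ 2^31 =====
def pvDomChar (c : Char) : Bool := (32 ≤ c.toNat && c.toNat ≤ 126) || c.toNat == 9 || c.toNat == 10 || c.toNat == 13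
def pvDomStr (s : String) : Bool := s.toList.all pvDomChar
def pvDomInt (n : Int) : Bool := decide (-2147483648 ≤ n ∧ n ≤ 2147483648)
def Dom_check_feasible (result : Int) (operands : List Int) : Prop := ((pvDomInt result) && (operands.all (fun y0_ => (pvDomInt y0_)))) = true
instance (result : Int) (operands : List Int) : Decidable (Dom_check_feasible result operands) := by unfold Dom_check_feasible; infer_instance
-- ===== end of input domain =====

-- B replaces A's layered set propagation by a short-circuiting depth-first recursion; alternative decomposition, same results.


-- ===== PORT A =====
-- inner 'for prev in cur' loop: builds temp from cur (set iteration order does not affect the resulting set)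
def pvAStep (result num : Int) (cur : PySem.Set Int) : PySem.Set Int :=
  cur.foldl (fun temp prev =>
    let temp := if prev + num ≤ result then PySem.Set.add temp (prev + num) else temp
    if prev * num ≤ result then PySem.Set.add temp (prev * num) else temp) PySem.Set.empty

-- outer 'for num in operands[1:]' loop with the early 'return False'
def pvALoop (result : Int) (cur : PySem.Set Int) : List Int → Bool
  | [] => PySem.Set.contains cur result
  | num :: rest =>
    let temp := pvAStep result num cur
    if temp.isEmpty then false else pvALoop result temp rest

def check_feasible (result : Int) (operands : List Int) : Bool :=
  match PySem.List.pyGet? operands 0 with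
  | none => false   -- operands[0] raises IndexError: excluded by Pre_
  | some h => pvALoop result (PySem.Set.ofList [h]) (PySem.List.slice operands (some 1) none)

-- ===== PORT B =====
def pvBDfs (result : Int) : Int → List Int → Bool
  | cur, [] => cur == result
  | cur, num :: rest =>
    (decide (cur + num ≤ result) && pvBDfs result (cur + num) rest) ||
    (decide (cur * num ≤ result) && pvBDfs result (cur * num) rest)

def check_feasible_alt (result : Int) (operands : List Int) : Bool :=
  match PySem.List.pyGet? operands 0 with
  | none => false   -- operands[0] raises IndexError: excluded by Pre_
  | some h => pvBDfs result h (PySem.List.slice operands (some 1) none)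

-- ===== PRECONDITION & SPEC =====
-- Both A and B raise IndexError on an empty operands list (operands[0]); only that input is excluded.
def Pre_check_feasible (result : Int) (operands : List Int) : Prop := operands ≠ []
instance (result : Int) (operands : List Int) : Decidable (Pre_check_feasible result operands) := by unfold Pre_check_feasible; infer_instance
def pvWitness_check_feasible : Int × List Int := (6, [2, 3])
def Spec_check_feasible (result : Int) (operands : List Int) (out : Bool) : Prop := out = check_feasible_alt result operands
instance (result : Int) (operands : List Int) (out : Bool) : Decidable (Spec_check_feasible result operands out) := by unfold Spec_check_feasible; infer_instance

-- ===== CLAIM (what is proved, stated in full; the proofs are below) =====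
def Claim_equal_check_feasible : Prop := ∀ (result : Int) (operands : List Int), Dom_check_feasible result operands → Pre_check_feasible result operands → Spec_check_feasible result operands (check_feasible result operands)

-- ===== LEMMAS AND PROOFS =====

-- membership after processing one 'prev' in the inner loop body
lemma pv_mem_body (result num prev v : Int) (temp : PySem.Set Int) :
    (v ∈ (let t := if prev + num ≤ result then PySem.Set.add temp (prev + num) else temp
          if prev * num ≤ result then PySem.Set.add t (prev * num) else t))
    ↔ v ∈ temp ∨ (v = prev + num ∧ prev + num ≤ result) ∨ (v = prev * num ∧ prev * num ≤ result) := by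
  dsimp only
  split_ifs <;> simp [PySem.Set.mem_add] <;> tauto

-- membership in the set the inner loop builds
lemma pv_mem_fold (result num : Int) (v : Int) :
    ∀ (l acc : List Int),
      (v ∈ l.foldl (fun temp prev =>
        let temp := if prev + num ≤ result then PySem.Set.add temp (prev + num) else temp
        if prev * num ≤ result then PySem.Set.add temp (prev * num) else temp) acc)
      ↔ v ∈ acc ∨ ∃ prev ∈ l,
          (v = prev + num ∧ prev + num ≤ result) ∨ (v = prev * num ∧ prev * num ≤ result) := by
  intro l
  induction l with
  | nil => intro acc; simp
  | cons p l ih =>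
    intro acc
    rw [List.foldl_cons, ih, pv_mem_body result num p v acc, List.exists_mem_cons_iff]
    exact or_assoc

lemma pv_mem_step (result num v : Int) (cur : PySem.Set Int) :
    v ∈ pvAStep result num cur ↔ ∃ prev ∈ cur,
      (v = prev + num ∧ prev + num ≤ result) ∨ (v = prev * num ∧ prev * num ≤ result) := by
  unfold pvAStep
  rw [pv_mem_fold]
  simp [PySem.Set.empty]

lemma pv_loop_eq_any (result : Int) :
    ∀ (rest : List Int) (cur : PySem.Set Int),
      pvALoop result cur rest = cur.any (fun v => pvBDfs result v rest) := by
  intro rest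
  induction rest with
  | nil =>
    intro cur
    simp only [pvALoop, pvBDfs]
    rw [Bool.eq_iff_iff]
    simp only [PySem.Set.contains, List.any_eq_true, List.contains_iff_mem, beq_iff_eq]
    exact ⟨fun h => ⟨result, h, rfl⟩, fun ⟨v, hv, e⟩ => e ▸ hv⟩
  | cons num rest ih =>
    intro cur
    simp only [pvALoop]
    have key : (pvAStep result num cur).any (fun v => pvBDfs result v rest)
        = cur.any (fun v => pvBDfs result v (num :: rest)) := by
      rw [Bool.eq_iff_iff]
      simp only [List.any_eq_true, pv_mem_step, pvBDfs, Bool.or_eq_true, Bool.and_eq_true,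
        decide_eq_true_eq]
      constructor
      · rintro ⟨v, ⟨prev, hprev, hcase⟩, hdfs⟩
        refine ⟨prev, hprev, ?_⟩
        rcases hcase with ⟨rfl, hle⟩ | ⟨rfl, hle⟩
        · exact Or.inl ⟨hle, hdfs⟩
        · exact Or.inr ⟨hle, hdfs⟩
      · rintro ⟨prev, hprev, ⟨hle, hdfs⟩ | ⟨hle, hdfs⟩⟩
        · exact ⟨prev + num, ⟨prev, hprev, Or.inl ⟨rfl, hle⟩⟩, hdfs⟩
        · exact ⟨prev * num, ⟨prev, hprev, Or.inr ⟨rfl, hle⟩⟩, hdfs⟩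
    split_ifs with hemp
    · rw [← key, List.isEmpty_iff.mp hemp]; rfl
    · rw [ih, key]

-- ===== VERDICT (by name: the statement is the Claim_ definition above) =====
theorem check_feasible_spec : Claim_equal_check_feasible := by
  intro result operands _ hpre
  unfold Spec_check_feasible check_feasible check_feasible_alt
  rcases operands with _ | ⟨h, rest⟩
  · exact absurd rfl hpre
  · have h0 : PySem.List.pyGet? (h :: rest) (0 : Int) = some h := by simp [pysem]
    have hs : PySem.List.slice (h :: rest) (some 1) none = rest := by
      rw [PySem.List.slice_from_one]; rfl
    rw [h0, hs]
    show pvALoop result (PySem.Set.ofList [h]) rest = pvBDfs result h rest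
    rw [pv_loop_eq_any]
    simp [PySem.Set.ofList, PySem.Set.add, PySem.Set.empty]
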